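-- pv_equiv track=rewrite | github.com/X-Olivia/Menstrual-Cycle-Prediction-from-WearablePhysiological-Data-in-Irregular-Cycles | new_workspace/record/experiment/multisignal_pipeline/menses.py | _countdown_started_flags
-- ===== SOURCE A (Python) =====
-- def _countdown_started_flags(det_seq, use_stability_gate=False, stable_days_required=2, stable_tol_days=1):
--     """Return per-day boolean flags indicating whether countdown has started."""
--     flags = []
--     countdown_started = False
--     last_non_none_ov = None
--     consecutive_stable_non_none = 0
--     for ov_est_today in det_seq:
--         if ov_est_today is not None and last_non_none_ov is not None:
--             if abs(ov_est_today - last_non_none_ov) <= stable_tol_days: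
--                 consecutive_stable_non_none += 1
--             else:
--                 consecutive_stable_non_none = 1
--         elif ov_est_today is not None:
--             consecutive_stable_non_none = 1
--         else:
--             consecutive_stable_non_none = 0
--
--         if ov_est_today is not None:
--             last_non_none_ov = ov_est_today
--
--         use_countdown = ov_est_today is not None
--         if use_stability_gate:
--             use_countdown = (
--                 ov_est_today is not None
--                 and consecutive_stable_non_none >= stable_days_required
--             )
--         if use_countdown:
--             countdown_started = True
--         flags.append(countdown_started)
--     return flags
-- ===== SOURCE B (Python) =====
-- def _countdown_started_flags(det_seq, use_stability_gate=False, stable_days_required=2, stable_tol_days=1):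
--     """Stateless per-day test: a day fires iff its value is present and (without the
--     gate) unconditionally, or (with the gate) the backward-looking run of adjacent
--     present values within tolerance ending that day is long enough; the flags are
--     True from the first firing day onward."""
--     def fires(i):
--         if det_seq[i] is None:
--             return False
--         if not use_stability_gate:
--             return True
--         run, k = 1, i
--         while k > 0 and det_seq[k - 1] is not None and abs(det_seq[k] - det_seq[k - 1]) <= stable_tol_days:
--             run += 1
--             k -= 1
--         return run >= stable_days_required
--     n = len(det_seq)
--     start = next((i for i in range(n) if fires(i)), n)
--     return [i >= start for i in range(n)]
-- ===== Notes on version B (the rewrite author's own statement) =====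
-- stated objective: alternative
-- what changed: Replaces A's single stateful forward scan (carried last-non-None value and consecutive-stability counter, sticky flag appended each day) by a stateless per-day predicate that tests each candidate day with a backward window walk over adjacent present values within tolerance, then searches for the first firing day and emits [i >= start].
import Mathlib
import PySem

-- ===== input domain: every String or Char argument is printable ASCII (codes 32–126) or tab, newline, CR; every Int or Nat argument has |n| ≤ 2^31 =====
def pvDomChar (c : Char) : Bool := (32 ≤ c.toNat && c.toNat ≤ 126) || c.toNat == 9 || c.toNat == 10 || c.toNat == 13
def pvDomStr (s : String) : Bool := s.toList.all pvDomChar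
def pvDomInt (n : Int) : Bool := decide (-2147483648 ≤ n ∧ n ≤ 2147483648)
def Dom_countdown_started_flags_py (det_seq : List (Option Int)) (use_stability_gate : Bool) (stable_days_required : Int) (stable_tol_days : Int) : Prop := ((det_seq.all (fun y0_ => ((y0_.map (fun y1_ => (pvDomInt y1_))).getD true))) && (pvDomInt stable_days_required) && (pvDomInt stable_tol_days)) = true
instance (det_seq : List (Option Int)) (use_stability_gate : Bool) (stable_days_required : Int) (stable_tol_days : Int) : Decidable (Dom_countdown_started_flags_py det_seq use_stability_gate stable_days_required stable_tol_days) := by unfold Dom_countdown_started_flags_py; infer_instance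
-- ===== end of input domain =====

-- B replaces A's stateful forward scan (carried last-value and stability counter) by a
-- stateless per-day backward-window test plus a first-firing-index search; objective: alternative.
-- ===== PORT A =====

def pvALoop (use_stability_gate : Bool) (stable_days_required stable_tol_days : Int) :
    List (Option Int) → Bool → Option Int → Int → List Bool
  | [], _, _, _ => []
  | ov_est_today :: rest, countdown_started, last_non_none_ov, consecutive_stable_non_none =>
    let cnt' : Int :=
      match ov_est_today, last_non_none_ov with
      | some o, some l => if |o - l| ≤ stable_tol_days then consecutive_stable_non_none + 1 else 1
      | some _, none => 1
      | none, _ => 0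
    let last' : Option Int :=
      match ov_est_today with
      | some o => some o
      | none => last_non_none_ov
    let use_countdown : Bool :=
      if use_stability_gate then
        ov_est_today.isSome && decide (stable_days_required ≤ cnt')
      else ov_est_today.isSome
    let started' : Bool := if use_countdown then true else countdown_started
    started' :: pvALoop use_stability_gate stable_days_required stable_tol_days rest started' last' cnt'

def countdown_started_flags_py (det_seq : List (Option Int)) (use_stability_gate : Bool) (stable_days_required : Int) (stable_tol_days : Int) : List Bool :=
  pvALoop use_stability_gate stable_days_required stable_tol_days det_seq false none 0

-- ===== PORT B =====
-- the backward while loop of `fires`: run length of adjacent present values within tolerance ending at index k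
-- (index accesses det[k], det[k-1] are always in range in B; getElem? is exact there)
def pvRunFrom (det : List (Option Int)) (tol : Int) : Nat → Int
  | 0 => 1
  | k + 1 =>
    match det[k]?, det[k + 1]? with
    | some (some a), some (some b) => if |b - a| ≤ tol then 1 + pvRunFrom det tol k else 1
    | _, _ => 1

-- B's local `fires(i)`
def pvFires (det : List (Option Int)) (gate : Bool) (req tol : Int) (i : Nat) : Bool :=
  match det[i]? with
  | some (some _) => if !gate then true else decide (req ≤ pvRunFrom det tol i)
  | _ => false

def countdown_started_flags_py_alt (det_seq : List (Option Int)) (use_stability_gate : Bool) (stable_days_required : Int) (stable_tol_days : Int) : List Bool :=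
  let n := det_seq.length
  -- next((i for i in range(n) if fires(i)), n)
  let start := ((List.range n).find? (pvFires det_seq use_stability_gate stable_days_required stable_tol_days)).getD n
  (List.range n).map (fun i => decide (start ≤ i))

-- ===== PRECONDITION & SPEC =====
def Spec_countdown_started_flags_py (det_seq : List (Option Int)) (use_stability_gate : Bool) (stable_days_required : Int) (stable_tol_days : Int) (out : List Bool) : Prop := out = countdown_started_flags_py_alt det_seq use_stability_gate stable_days_required stable_tol_days
instance (det_seq : List (Option Int)) (use_stability_gate : Bool) (stable_days_required : Int) (stable_tol_days : Int) (out : List Bool) : Decidable (Spec_countdown_started_flags_py det_seq use_stability_gate stable_days_required stable_tol_days out) := by unfold Spec_countdown_started_flags_py; infer_instance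

-- ===== CLAIM (what is proved, stated in full; the proofs are below) =====
def Claim_equal_countdown_started_flags_py : Prop := ∀ (det_seq : List (Option Int)) (use_stability_gate : Bool) (stable_days_required : Int) (stable_tol_days : Int), Dom_countdown_started_flags_py det_seq use_stability_gate stable_days_required stable_tol_days → Spec_countdown_started_flags_py det_seq use_stability_gate stable_days_required stable_tol_days (countdown_started_flags_py det_seq use_stability_gate stable_days_required stable_tol_days)

-- ===== LEMMAS AND PROOFS =====

-- proof-only intermediate: the first index at which A's loop fires, phrased as A's own scan
def pvFindStart (g : Bool) (req tol : Int) :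
    List (Option Int) → Option Int → Int → Nat
  | [], _, _ => 0
  | ov :: rest, last, cnt =>
    match ov with
    | some o =>
      let cnt' : Int :=
        match last with
        | some l => if |o - l| ≤ tol then cnt + 1 else 1
        | none => 1
      if !g || decide (req ≤ cnt') then 0
      else 1 + pvFindStart g req tol rest (some o) cnt'
    | none => 1 + pvFindStart g req tol rest last 0

-- the state invariant linking A's carried (last, cnt) at position p to the backward run
def pvHState (det : List (Option Int)) (tol : Int) (p : Nat) (last : Option Int) (cnt : Int) : Prop :=
  match p with
  | 0 => cnt = 0
  | q + 1 =>
    match det[q]? with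
    | some (some b) => last = some b ∧ cnt = pvRunFrom det tol q
    | _ => cnt = 0

lemma pv_range_map_shift (s n : Nat) :
    (List.range (n+1)).map (fun i => decide (1 + s ≤ i)) =
      false :: (List.range n).map (fun i => decide (s ≤ i)) := by
  rw [List.range_succ_eq_map, List.map_cons, List.map_map]
  refine congrArg₂ _ (by simp) (List.map_congr_left fun i _ => ?_)
  simp [Nat.add_comm 1 s]

lemma pvALoop_true (g : Bool) (req tol : Int) (l : List (Option Int)) (last : Option Int) (cnt : Int) :
    pvALoop g req tol l true last cnt = List.replicate l.length true := by
  induction l generalizing last cnt with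
  | nil => rfl
  | cons ov rest ih =>
    simp [pvALoop, ih, List.replicate_succ, ite_self]

lemma pvALoop_eq (g : Bool) (req tol : Int) (l : List (Option Int)) (last : Option Int) (cnt : Int) :
    pvALoop g req tol l false last cnt =
      (List.range l.length).map (fun i => decide (pvFindStart g req tol l last cnt ≤ i)) := by
  induction l generalizing last cnt with
  | nil => rfl
  | cons ov rest ih =>
    cases ov with
    | none =>
      have hA : pvALoop g req tol (none :: rest) false last cnt
          = false :: pvALoop g req tol rest false last 0 := by
        cases g <;> simp [pvALoop]
      rw [hA, ih]
      show _ = (List.range (rest.length + 1)).map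
        (fun i => decide (1 + pvFindStart g req tol rest last 0 ≤ i))
      rw [pv_range_map_shift]
    | some o =>
      set c : Int := (match last with
          | some l => if |o - l| ≤ tol then cnt + 1 else 1
          | none => 1) with hc
      have hcA : pvALoop g req tol (some o :: rest) false last cnt
          = (if g then decide (req ≤ c) else true)
            :: pvALoop g req tol rest (if g then decide (req ≤ c) else true) (some o) c := by
        cases last <;> cases g <;> simp [pvALoop, hc]
      have hcB : pvFindStart g req tol (some o :: rest) last cnt
          = if (!g || decide (req ≤ c)) then 0
            else 1 + pvFindStart g req tol rest (some o) c := by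
        cases last <;> cases g <;> simp [pvFindStart, hc]
      rw [hcA, hcB]
      by_cases hfire : (!g || decide (req ≤ c)) = true
      · have h1 : (if g then decide (req ≤ c) else true) = true := by
          cases g <;> simp_all
        rw [h1, if_pos hfire, pvALoop_true]
        simp [List.eq_replicate_iff]
      · have hg : g = true := by cases g <;> simp_all
        subst hg
        have hreq : decide (req ≤ c) = false := by simpa using hfire
        rw [if_neg hfire]
        simp only [if_true, hreq]
        rw [ih]
        show _ = (List.range (rest.length + 1)).map
          (fun i => decide (1 + pvFindStart true req tol rest (some o) c ≤ i))
        rw [pv_range_map_shift]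

lemma pv_find_ge (det : List (Option Int)) (g : Bool) (req tol : Int) (p m : Nat)
    (hpm : p + m ≤ det.length) :
    p ≤ ((List.range' p m).find? (pvFires det g req tol)).getD det.length := by
  rcases h : (List.range' p m).find? (pvFires det g req tol) with _ | j
  · simp; omega
  · have := List.mem_range'.mp (List.mem_of_find?_eq_some h)
    simp; omega

lemma pvFindStart_eq (g : Bool) (req tol : Int) (det : List (Option Int)) :
    ∀ (l : List (Option Int)) (p : Nat) (last : Option Int) (cnt : Int),
      det.drop p = l → pvHState det tol p last cnt →
      pvFindStart g req tol l last cnt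
        = (((List.range' p (det.length - p)).find? (pvFires det g req tol)).getD det.length) - p := by
  intro l
  induction l with
  | nil =>
    intro p last cnt hdrop _
    have hp : det.length ≤ p := by
      by_contra h
      have := List.length_drop (l := det) (i := p)
      rw [hdrop] at this; simp at this; omega
    have : det.length - p = 0 := by omega
    simp [pvFindStart, this]
  | cons ov rest ih =>
    intro p last cnt hdrop hst
    have hlt : p < det.length := by
      by_contra h
      have : det.drop p = [] := List.drop_eq_nil_of_le (by omega)
      rw [hdrop] at this; simp at this
    have hget : det[p]? = some ov := by
      have h : (det.drop p)[0]? = det[p + 0]? := List.getElem?_drop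
      rw [hdrop] at h; simpa using h.symm
    have hdrop' : det.drop (p+1) = rest := by
      have := List.drop_drop (l := det) (i := 1) (j := p)
      rw [hdrop] at this
      simpa [Nat.add_comm] using this.symm
    have hm : det.length - p = (det.length - (p+1)) + 1 := by omega
    have hrange : List.range' p (det.length - p)
        = p :: List.range' (p+1) (det.length - (p+1)) := by
      rw [hm, List.range'_succ]
    have hge := pv_find_ge det g req tol (p+1) (det.length - (p+1)) (by omega)
    cases ov with
    | none =>
      have hfires : pvFires det g req tol p = false := by
        simp [pvFires, hget]
      have hst' : pvHState det tol (p+1) last 0 := by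
        simp [pvHState, hget]
      rw [hrange]
      simp only [List.find?_cons, hfires]
      rw [pvFindStart, ih (p+1) last 0 hdrop' hst']
      omega
    | some o =>
      have hfires : pvFires det g req tol p
          = (!g || decide (req ≤ pvRunFrom det tol p)) := by
        cases g <;> simp [pvFires, hget]
      have hL : pvFindStart g req tol (some o :: rest) last cnt
          = if (!g || decide (req ≤ pvRunFrom det tol p)) then 0
            else 1 + pvFindStart g req tol rest (some o) (pvRunFrom det tol p) := by
        rcases last with _ | l
        · -- last carried value absent: A's counter becomes 1 and the backward run is 1
          have hrun : pvRunFrom det tol p = 1 := by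
            cases p with
            | zero => rfl
            | succ q =>
              rcases hq : det[q]? with _ | ob
              · rw [pvRunFrom, hq, hget]
              · cases ob with
                | none => rw [pvRunFrom, hq, hget]
                | some b => simp [pvHState, hq] at hst
          simp [pvFindStart, hrun]
        · have hcl : (if |o - l| ≤ tol then cnt + 1 else 1) = pvRunFrom det tol p := by
            cases p with
            | zero =>
              have hc0 : cnt = 0 := hst
              subst hc0
              have h1 : pvRunFrom det tol 0 = 1 := rfl
              rw [h1]; by_cases h : |o - l| ≤ tol <;> simp [h]
            | succ q =>
              rcases hq : det[q]? with _ | ob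
              · have hc0 : cnt = 0 := by simpa [pvHState, hq] using hst
                subst hc0
                rw [pvRunFrom, hq, hget]
                by_cases h : |o - l| ≤ tol <;> simp [h]
              · cases ob with
                | none =>
                  have hc0 : cnt = 0 := by simpa [pvHState, hq] using hst
                  subst hc0
                  rw [pvRunFrom, hq, hget]
                  by_cases h : |o - l| ≤ tol <;> simp [h]
                | some b =>
                  have hpair : l = b ∧ cnt = pvRunFrom det tol q := by
                    simpa [pvHState, hq] using hst
                  rw [pvRunFrom, hq, hget, hpair.1, hpair.2]
                  by_cases h : |o - b| ≤ tol <;> simp [h, Int.add_comm]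
          simp [pvFindStart, hcl]
      rw [hL, hrange]
      simp only [List.find?_cons, hfires]
      by_cases hf : (!g || decide (req ≤ pvRunFrom det tol p)) = true
      · simp [hf]
      · have hf' : (!g || decide (req ≤ pvRunFrom det tol p)) = false := by
          simpa using hf
        have hst' : pvHState det tol (p+1) (some o) (pvRunFrom det tol p) := by
          simp [pvHState, hget]
        simp only [hf']
        rw [if_neg (by simp)]
        rw [ih (p+1) (some o) (pvRunFrom det tol p) hdrop' hst']
        omega

-- ===== VERDICT (by name: the statement is the Claim_ definition above) =====
theorem countdown_started_flags_py_spec : Claim_equal_countdown_started_flags_py := by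
  intro det g req tol _
  unfold Spec_countdown_started_flags_py countdown_started_flags_py countdown_started_flags_py_alt
  rw [pvALoop_eq g req tol det none 0]
  have h0 := pvFindStart_eq g req tol det det 0 none 0 (by simp) (by simp [pvHState])
  simp only [List.range_eq_range'] at *
  rw [h0]
  simp
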